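-- pv_equiv track=rewrite | github.com/sihyonn/codingtest_python | programmers/kakao_2023_emoticon.py | simulate_purchase
-- ===== SOURCE A (Python) =====
-- def simulate_purchase(users, emoticons, discounts):
--
--     plus_users = 0
--     total_amount = 0
--
--     for standard_rate, standard_amount in users:
--         user_total_price = 0
--
--         for i in range(len(emoticons)):
--             if discounts[i] >= standard_rate:
--                 discount_price = emoticons[i] * (100 - discounts[i]) // 100
--                 user_total_price += discount_price
--
--         if user_total_price >= standard_amount:
--             plus_users += 1
--         else:
--             total_amount += user_total_price
--
--     return plus_users, total_amount
-- ===== SOURCE B (Python) =====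
-- def _bisect_left(a, x):
--     lo, hi = 0, len(a)
--     while lo < hi:
--         mid = (lo + hi) // 2
--         if a[mid] < x:
--             lo = mid + 1
--         else:
--             hi = mid
--     return lo
--
--
-- def simulate_purchase(users, emoticons, discounts):
--     # Sort (price, discount) pairs by discount; suffix-sum the discounted
--     # prices; each user's total is then one binary search + one lookup.
--     pairs = sorted(zip(emoticons, discounts), key=lambda p: p[1])
--     discs = [d for _, d in pairs]
--     n = len(pairs)
--     suffix = [0] * (n + 1)
--     for i in range(n - 1, -1, -1):
--         price, d = pairs[i]
--         suffix[i] = suffix[i + 1] + price * (100 - d) // 100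
--     plus_users = 0
--     total_amount = 0
--     for rate, amount in users:
--         s = suffix[_bisect_left(discs, rate)]
--         if s >= amount:
--             plus_users += 1
--         else:
--             total_amount += s
--     return plus_users, total_amount
-- ===== Notes on version B (the rewrite author's own statement) =====
-- stated objective: faster
-- what changed: Instead of rescanning all emoticons for every user, B sorts the (price, discount) pairs by discount once, builds suffix sums of the discounted prices, and answers each user with a binary search on the discount threshold.
import Mathlib
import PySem

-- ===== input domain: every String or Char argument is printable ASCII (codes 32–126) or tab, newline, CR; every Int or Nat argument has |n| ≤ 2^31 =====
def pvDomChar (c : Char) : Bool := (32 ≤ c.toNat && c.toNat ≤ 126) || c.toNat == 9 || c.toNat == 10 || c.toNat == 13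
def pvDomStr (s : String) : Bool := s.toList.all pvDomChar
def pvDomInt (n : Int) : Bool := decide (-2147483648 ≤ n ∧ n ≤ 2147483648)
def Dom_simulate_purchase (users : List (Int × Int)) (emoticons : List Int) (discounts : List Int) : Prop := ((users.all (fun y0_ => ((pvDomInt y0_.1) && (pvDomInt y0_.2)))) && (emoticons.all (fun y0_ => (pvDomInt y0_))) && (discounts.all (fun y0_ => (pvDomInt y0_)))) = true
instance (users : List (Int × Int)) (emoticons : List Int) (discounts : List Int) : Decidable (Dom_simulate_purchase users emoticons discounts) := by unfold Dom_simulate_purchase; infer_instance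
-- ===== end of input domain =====

-- B replaces A's per-user rescan of all emoticons by sort + suffix sums + binary search (objective: faster).


-- ===== PORT A =====
def simulate_purchase (users : List (Int × Int)) (emoticons : List Int) (discounts : List Int) : Int × Int :=
  users.foldl (fun (acc : Int × Int) (u : Int × Int) =>
    let user_total_price :=
      (PySem.List.pyRange 0 (emoticons.length : Int) 1).foldl (fun s i =>
        if PySem.List.pyGetD discounts i 0 ≥ u.1 then
          s + PySem.Int.floordiv (PySem.List.pyGetD emoticons i 0 * (100 - PySem.List.pyGetD discounts i 0)) 100
        else s) 0
    if user_total_price ≥ u.2 then (acc.1 + 1, acc.2) else (acc.1, acc.2 + user_total_price))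
    (0, 0)

-- ===== PORT B =====
-- suffix[i] = sum of discounted prices of pairs[i:], built back to front exactly as Source B's downward loop does
def pvSuffix (pairs : List (Int × Int)) : List Int :=
  match pairs with
  | [] => [0]
  | (price, d) :: t =>
      let s := pvSuffix t
      (PySem.Int.floordiv (price * (100 - d)) 100 + s.headD 0) :: s

-- Source B's hand-written _bisect_left is exactly the prelude primitive PySem.List.bisectLeft
def simulate_purchase_alt (users : List (Int × Int)) (emoticons : List Int) (discounts : List Int) : Int × Int :=
  let pairs := PySem.List.sorted (emoticons.zip discounts) Prod.snd
  let discs := pairs.map Prod.snd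
  let suffix := pvSuffix pairs
  users.foldl (fun (acc : Int × Int) (u : Int × Int) =>
    let s := suffix.getD (PySem.List.bisectLeft discs u.1) 0
    if s ≥ u.2 then (acc.1 + 1, acc.2) else (acc.1, acc.2 + s))
    (0, 0)

-- ===== PRECONDITION & SPEC =====
-- Pre_ excludes only inputs where A raises IndexError: some user exists and discounts is shorter than emoticons.
def Pre_simulate_purchase (users : List (Int × Int)) (emoticons : List Int) (discounts : List Int) : Prop :=
  users = [] ∨ emoticons.length ≤ discounts.length
instance (users : List (Int × Int)) (emoticons : List Int) (discounts : List Int) : Decidable (Pre_simulate_purchase users emoticons discounts) := by unfold Pre_simulate_purchase; infer_instance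

def pvWitness_simulate_purchase : (List (Int × Int)) × List Int × List Int :=
  ([(40, 10000), (25, 10000)], ([7000, 9000, 5000, 3000], [40, 40, 40, 40]))

def Spec_simulate_purchase (users : List (Int × Int)) (emoticons : List Int) (discounts : List Int) (out : Int × Int) : Prop := out = simulate_purchase_alt users emoticons discounts
instance (users : List (Int × Int)) (emoticons : List Int) (discounts : List Int) (out : Int × Int) : Decidable (Spec_simulate_purchase users emoticons discounts out) := by unfold Spec_simulate_purchase; infer_instance

-- ===== CLAIM (what is proved, stated in full; the proofs are below) =====
def Claim_equal_simulate_purchase : Prop := ∀ (users : List (Int × Int)) (emoticons : List Int) (discounts : List Int), Dom_simulate_purchase users emoticons discounts → Pre_simulate_purchase users emoticons discounts → Spec_simulate_purchase users emoticons discounts (simulate_purchase users emoticons discounts)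

-- ===== LEMMAS AND PROOFS =====

-- the discounted price of one (price, discount) pair
def pvF (z : Int × Int) : Int := PySem.Int.floordiv (z.1 * (100 - z.2)) 100

-- the per-user summand: the discounted price if the pair's discount reaches the rate, else 0
def pvG (rate : Int) (z : Int × Int) : Int := if rate ≤ z.2 then pvF z else 0

lemma pvSuffix_getD (l : List (Int × Int)) (i : Nat) :
    (pvSuffix l).getD i 0 = ((l.drop i).map pvF).sum := by
  induction l generalizing i with
  | nil => cases i <;> simp [pvSuffix]
  | cons hd t ih =>
    obtain ⟨p, d⟩ := hd
    cases i with
    | zero =>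
      have h0 := ih 0
      simp only [pvSuffix, List.getD_cons_zero, List.drop_zero, List.map_cons, List.sum_cons]
      have : (pvSuffix t).headD 0 = (pvSuffix t).getD 0 0 := by
        cases ht : pvSuffix t with
        | nil => rfl
        | cons a s => rfl
      rw [this, h0]
      simp [pvF]
    | succ j =>
      simp only [pvSuffix, List.getD_cons_succ, List.drop_succ_cons]
      exact ih j

lemma pvAside (em disc : List Int) (h : em.length ≤ disc.length) (rate : Int) :
    (PySem.List.pyRange 0 (em.length : Int) 1).foldl (fun s i =>
        if PySem.List.pyGetD disc i 0 ≥ rate then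
          s + PySem.Int.floordiv (PySem.List.pyGetD em i 0 * (100 - PySem.List.pyGetD disc i 0)) 100
        else s) 0
    = ((em.zip disc).map (pvG rate)).sum := by
  have hlen : (em.zip disc).length = em.length := by rw [List.length_zip]; omega
  have e1 : (PySem.List.pyRange 0 (em.length : Int) 1).foldl (fun s i =>
        if PySem.List.pyGetD disc i 0 ≥ rate then
          s + PySem.Int.floordiv (PySem.List.pyGetD em i 0 * (100 - PySem.List.pyGetD disc i 0)) 100
        else s) 0
      = (PySem.List.pyRange 0 (em.length : Int) 1).foldl (fun s i =>
          (fun (s : Int) (z : Int × Int) => if rate ≤ z.2 then s + pvF z else s) s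
            (PySem.List.pyGetD (em.zip disc) i (0, 0))) 0 := by
    apply List.foldl_ext
    intro s i hi
    rw [PySem.List.mem_pyRange_one] at hi
    have h0 := hi.1
    have h1 : i < (em.length : Int) := hi.2
    have h2 : i < (disc.length : Int) := lt_of_lt_of_le h1 (by exact_mod_cast h)
    rw [PySem.List.pyGetD_eq_getElem em 0 h0 h1,
        PySem.List.pyGetD_eq_getElem disc 0 h0 h2,
        PySem.List.pyGetD_eq_getElem (em.zip disc) (0, 0) h0 (by rw [hlen]; exact h1),
        List.getElem_zip]
    rfl
  have e3 := PySem.List.foldl_pyRange_zero_pyGetD' (em.zip disc) ((0 : Int), (0 : Int))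
      (fun (s : Int) (z : Int × Int) => if rate ≤ z.2 then s + pvF z else s) 0
  rw [e1, show ((em.length : Int)) = (((em.zip disc).length : Nat) : Int) by rw [hlen], e3]
  have e2 : (em.zip disc).foldl (fun (s : Int) (z : Int × Int) => if rate ≤ z.2 then s + pvF z else s) 0
      = (em.zip disc).foldl (fun (s : Int) (z : Int × Int) => s + pvG rate z) 0 := by
    apply List.foldl_ext
    intro s z _
    by_cases hz : rate ≤ z.2 <;> simp [pvG, hz]
  rw [e2, PySem.List.foldl_add, zero_add]

lemma pvBside (em disc : List Int) (rate : Int) :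
    (pvSuffix (PySem.List.sorted (em.zip disc) Prod.snd)).getD
        (PySem.List.bisectLeft ((PySem.List.sorted (em.zip disc) Prod.snd).map Prod.snd) rate) 0
    = ((em.zip disc).map (pvG rate)).sum := by
  set L := em.zip disc with hL
  set pairs := PySem.List.sorted L Prod.snd with hpairs
  set discs := pairs.map Prod.snd with hdiscs
  set c := PySem.List.bisectLeft discs rate with hc
  have hdl : discs.length = pairs.length := by rw [hdiscs, List.length_map]
  have hsort : List.Pairwise (fun a b => a ≤ b) discs := PySem.List.sorted_map_key_pairwise L Prod.snd
  obtain ⟨hcle, hlt, hge⟩ := PySem.List.bisectLeft_spec discs rate hsort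
  rw [pvSuffix_getD]
  have hperm : ((pairs.map (pvG rate)).Perm (L.map (pvG rate))) :=
    (PySem.List.sorted_perm L Prod.snd false).map _
  rw [← hperm.sum_eq]
  conv_rhs => rw [← List.take_append_drop c pairs]
  rw [List.map_append, List.sum_append]
  have htake : ((pairs.take c).map (pvG rate)).sum = 0 := by
    apply List.sum_eq_zero
    intro x hx
    rw [List.mem_map] at hx
    obtain ⟨z, hz, rfl⟩ := hx
    rw [List.mem_iff_getElem] at hz
    obtain ⟨j, hj, hzj⟩ := hz
    rw [List.length_take] at hj
    have hjc : j < c := lt_of_lt_of_le hj (min_le_left _ _)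
    have hjp : j < pairs.length := lt_of_lt_of_le hj (min_le_right _ _)
    rw [List.getElem_take] at hzj
    have hd : discs[j]'(by omega) = pairs[j].2 := by
      simp [hdiscs]
    have h1 : z.2 < rate := by
      have := hlt j (by omega) hjc
      rw [hd, hzj] at this
      exact this
    simp [pvG, not_le.mpr h1]
  have hdrop : (pairs.drop c).map (pvG rate) = (pairs.drop c).map pvF := by
    apply List.map_congr_left
    intro z hz
    rw [List.mem_iff_getElem] at hz
    obtain ⟨j, hj, hzj⟩ := hz
    rw [List.length_drop] at hj
    have hcj : c + j < pairs.length := by omega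
    rw [List.getElem_drop] at hzj
    have hd : discs[c + j]'(by omega) = pairs[c + j].2 := by
      simp [hdiscs]
    have h1 : rate ≤ z.2 := by
      have := hge (c + j) (by omega) (Nat.le_add_right c j)
      rw [hd, hzj] at this
      exact this
    simp [pvG, h1]
  rw [htake, hdrop, zero_add]

-- ===== VERDICT (by name: the statement is the Claim_ definition above) =====
theorem simulate_purchase_spec : Claim_equal_simulate_purchase := by
  intro users em disc _ hpre
  unfold Spec_simulate_purchase
  rcases hpre with h | h
  · subst h; rfl
  · unfold simulate_purchase simulate_purchase_alt
    apply List.foldl_ext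
    intro acc u _
    rw [pvAside em disc h u.1, ← pvBside em disc u.1]
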